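-- pv_equiv track=rewrite | github.com/mufibra/hack2skill-marketing-agents | tools/competitive.py | severity_rating
-- ===== SOURCE A (Python) =====
-- def severity_rating(changes):
--     """Determine overall severity from list of changes."""
--     if not changes:
--         return "minor"
--     severities = [c["severity"] for c in changes]
--     if "urgent" in severities:
--         return "urgent"
--     if "notable" in severities:
--         return "notable"
--     return "minor"
-- ===== SOURCE B (Python) =====
-- def severity_rating(changes):
--     """Determine overall severity from list of changes."""
--     def rank(s):
--         return 2 if s == "urgent" else 1 if s == "notable" else 0
--     best = max((rank(c["severity"]) for c in changes), default=0)
--     return ("minor", "notable", "urgent")[best]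
-- ===== Notes on version B (the rewrite author's own statement) =====
-- stated objective: alternative
-- what changed: Replaces A's build-a-severity-list-plus-two-membership-scans with an order-theoretic reduction: each severity is mapped to a numeric rank, the maximum rank is taken over the list, and the result is read back from a rank-indexed table.
import Mathlib
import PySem

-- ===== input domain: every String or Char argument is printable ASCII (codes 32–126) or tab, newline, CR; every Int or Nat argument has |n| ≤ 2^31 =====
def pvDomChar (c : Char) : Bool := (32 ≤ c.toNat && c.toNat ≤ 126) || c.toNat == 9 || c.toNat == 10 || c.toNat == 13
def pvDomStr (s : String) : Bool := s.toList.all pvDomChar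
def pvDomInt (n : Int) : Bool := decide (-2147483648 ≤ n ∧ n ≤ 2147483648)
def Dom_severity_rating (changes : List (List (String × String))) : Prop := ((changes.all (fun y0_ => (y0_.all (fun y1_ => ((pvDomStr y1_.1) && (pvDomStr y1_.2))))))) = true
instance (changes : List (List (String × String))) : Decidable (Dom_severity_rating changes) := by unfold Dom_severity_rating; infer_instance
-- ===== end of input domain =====

-- B replaces A's build-a-severity-list-plus-two-membership-scans with a numeric-rank
-- max-reduction and a rank-indexed table lookup (alternative decomposition, same O(n) cost).


-- ===== PORT A =====
-- A: build severities list, then membership tests. `c["severity"]` raises KeyError on a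
-- missing key; Pre_ excludes those inputs, so the `.getD ""` default never fires on Pre_.
def severity_rating (changes : List (List (String × String))) : String :=
  if changes = [] then "minor"
  else
    let severities := changes.map (fun c => ((PySem.Dict.mk c).get? "severity").getD "")
    if severities.contains "urgent" then "urgent"
    else if severities.contains "notable" then "notable"
    else "minor"

-- ===== PORT B =====
-- B helper: rank of a severity string (Source B's inner `rank`).
def svRank (s : String) : Int :=
  if s = "urgent" then 2 else if s = "notable" then 1 else 0

-- B: max of ranks (Python's max(..., default=0) = foldl max over the generator starting
-- at 0, since every rank is ≥ 0), then rank-indexed tuple lookup; `.getD ""` for the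
-- KeyError case never fires on Pre_, and the table lookup is ported with pyGet?.
def severity_rating_alt (changes : List (List (String × String))) : String :=
  let best := (changes.map (fun c => svRank (((PySem.Dict.mk c).get? "severity").getD ""))).foldl max 0
  (PySem.List.pyGet? ["minor", "notable", "urgent"] best).getD ""

-- ===== PRECONDITION & SPEC =====
-- Pre_: every change dict has a "severity" key (A raises KeyError otherwise).
def Pre_severity_rating (changes : List (List (String × String))) : Prop :=
  ∀ c ∈ changes, ((PySem.Dict.mk c).get? "severity").isSome
instance (changes : List (List (String × String))) : Decidable (Pre_severity_rating changes) := by unfold Pre_severity_rating; infer_instance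
def pvWitness_severity_rating : (List (List (String × String))) := [[("severity", "urgent")], [("severity", "minor")]]
def Spec_severity_rating (changes : List (List (String × String))) (out : String) : Prop := out = severity_rating_alt changes
instance (changes : List (List (String × String))) (out : String) : Decidable (Spec_severity_rating changes out) := by unfold Spec_severity_rating; infer_instance

-- ===== CLAIM (what is proved, stated in full; the proofs are below) =====
def Claim_equal_severity_rating : Prop := ∀ (changes : List (List (String × String))), Dom_severity_rating changes → Pre_severity_rating changes → Spec_severity_rating changes (severity_rating changes)

-- ===== LEMMAS AND PROOFS =====

-- Shorthand for the severity read out of a change dict.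
def svOf (c : List (String × String)) : String := ((PySem.Dict.mk c).get? "severity").getD ""

-- The max-reduction of the ranks, from any start, equals max of the start with the
-- branching value A's membership tests compute.
theorem foldl_max_rank (changes : List (List (String × String))) (acc : Int)
    (hacc : 0 ≤ acc) :
    (changes.map (fun c => svRank (svOf c))).foldl max acc
    = max acc (if changes.any (fun c => svOf c == "urgent") then 2
               else if changes.any (fun c => svOf c == "notable") then 1 else 0) := by
  induction changes generalizing acc with
  | nil => simp [max_eq_left hacc]
  | cons c cs ih =>
    simp only [List.map_cons, List.foldl_cons]
    rw [ih (max acc (svRank (svOf c))) (le_trans hacc (le_max_left _ _))]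
    by_cases h1 : svOf c = "urgent" <;>
      by_cases h2 : svOf c = "notable" <;>
        by_cases h3 : cs.any (fun c => svOf c == "urgent") <;>
          by_cases h4 : cs.any (fun c => svOf c == "notable") <;>
            simp [svRank, h1, h2, h3, h4, List.any_cons]

-- A's membership test on the mapped severities list, phrased as B's `any` over changes.
theorem contains_map_any (changes : List (List (String × String))) (s : String) :
    (changes.map (fun c => svOf c)).contains s
    = changes.any (fun c => svOf c == s) := by
  induction changes with
  | nil => simp
  | cons c cs ih =>
    simp only [List.map_cons, List.contains_cons, List.any_cons, ih]
    by_cases hc : svOf c = s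
    · simp [hc]
    · have hc' : ¬ (s = svOf c) := fun h => hc h.symm
      rw [beq_eq_false_iff_ne.mpr hc, beq_eq_false_iff_ne.mpr hc']

-- ===== VERDICT (by name: the statement is the Claim_ definition above) =====
theorem severity_rating_spec : Claim_equal_severity_rating := by
  intro changes _ _
  unfold Spec_severity_rating
  have h := foldl_max_rank changes 0 le_rfl
  have hu := contains_map_any changes "urgent"
  have hn := contains_map_any changes "notable"
  simp only [svOf] at h hu hn
  simp only [severity_rating, severity_rating_alt, h, hu, hn]
  rcases changes with _ | ⟨c, cs⟩
  · simp [PySem.List.pyGet?, PySem.List.pyIdx?]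
  · rw [if_neg (by simp : ¬ (c :: cs = []))]
    by_cases h1 : (c :: cs).any (fun c => ((PySem.Dict.mk c).get? "severity").getD "" == "urgent") <;>
      by_cases h2 : (c :: cs).any (fun c => ((PySem.Dict.mk c).get? "severity").getD "" == "notable") <;>
        simp only [h1, h2, if_true, if_false, Bool.false_eq_true] <;>
          rfl
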